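-- pv_equiv track=rewrite | github.com/scchow/aoc-2021 | day_02/python/p2.py | execute_commands
-- ===== SOURCE A (Python) =====
-- def execute_commands(commands: list):
--     """ Execute a list of command tuples (direction, units)
--     on a vehicle
--
--     Args:
--         l (list): List of command tuples
--
--     Returns:
--         List [horizontal, vertical]: final horizontal and vertical position of vehicle
--     """
--
--     # vehicle state represented as a list: [horizontal position, vertical position, aim]
--     state = [0, 0, 0]
--
--     for direction, units in commands:
--         if direction == "forward":
--             state[0] += units
--             state[1] += units * state[2]
--         if direction == "up":
--             state[2] -= units
--         if direction == "down":
--             state[2] += units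
--
--     return state[0:2]
-- ===== SOURCE B (Python) =====
-- def execute_commands(commands: list):
--     """Same result as A: horizontal total via an order-independent filtered sum,
--     then a second pass tracking only aim and vertical."""
--     horizontal = sum(units for direction, units in commands if direction == "forward")
--     aim = 0
--     vertical = 0
--     for direction, units in commands:
--         if direction == "down":
--             aim += units
--         elif direction == "up":
--             aim -= units
--         elif direction == "forward":
--             vertical += units * aim
--     return [horizontal, vertical]
-- ===== Notes on version B (the rewrite author's own statement) =====
-- stated objective: alternative
-- what changed: Replaces the single fused pass over a three-field state list with an order-independent filtered sum for the horizontal total plus a second pass that tracks only aim and vertical.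
import Mathlib
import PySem

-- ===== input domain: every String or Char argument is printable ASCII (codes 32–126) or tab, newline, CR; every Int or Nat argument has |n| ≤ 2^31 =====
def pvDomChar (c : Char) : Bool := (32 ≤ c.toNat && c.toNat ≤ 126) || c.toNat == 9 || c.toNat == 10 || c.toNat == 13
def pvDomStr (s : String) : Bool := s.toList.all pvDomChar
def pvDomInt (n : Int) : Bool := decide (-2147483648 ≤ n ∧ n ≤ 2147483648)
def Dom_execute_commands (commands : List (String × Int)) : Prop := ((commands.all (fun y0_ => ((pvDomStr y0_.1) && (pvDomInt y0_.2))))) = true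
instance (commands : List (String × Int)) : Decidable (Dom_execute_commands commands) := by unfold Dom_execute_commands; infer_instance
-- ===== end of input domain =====

-- B replaces A's single fused pass over a [horizontal, vertical, aim] state with an order-independent filtered sum for the horizontal total plus a second pass tracking only aim and vertical (objective: alternative decomposition, same O(n) cost).


-- ===== PORT A =====
-- step for A's loop body: three sequential ifs on a (horizontal, vertical, aim) state
def stepA (s : Int × Int × Int) (du : String × Int) : Int × Int × Int :=
  let s := if du.1 == "forward" then (s.1 + du.2, s.2.1 + du.2 * s.2.2, s.2.2) else s
  let s := if du.1 == "up" then (s.1, s.2.1, s.2.2 - du.2) else s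
  let s := if du.1 == "down" then (s.1, s.2.1, s.2.2 + du.2) else s
  s

def execute_commands (commands : List (String × Int)) : List Int :=
  let state := commands.foldl stepA (0, 0, 0)
  [state.1, state.2.1]

-- ===== PORT B =====
-- step for B's second loop: state is (aim, vertical)
def stepB (p : Int × Int) (du : String × Int) : Int × Int :=
  if du.1 == "down" then (p.1 + du.2, p.2)
  else if du.1 == "up" then (p.1 - du.2, p.2)
  else if du.1 == "forward" then (p.1, p.2 + du.2 * p.1)
  else p

def execute_commands_alt (commands : List (String × Int)) : List Int :=
  let horizontal := commands.foldl (fun acc du => if du.1 == "forward" then acc + du.2 else acc) 0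
  let p := commands.foldl stepB (0, 0)
  [horizontal, p.2]

-- ===== PRECONDITION & SPEC =====
def Spec_execute_commands (commands : List (String × Int)) (out : List Int) : Prop := out = execute_commands_alt commands
instance (commands : List (String × Int)) (out : List Int) : Decidable (Spec_execute_commands commands out) := by unfold Spec_execute_commands; infer_instance

-- ===== CLAIM (what is proved, stated in full; the proofs are below) =====
def Claim_equal_execute_commands : Prop := ∀ (commands : List (String × Int)), Dom_execute_commands commands → Spec_execute_commands commands (execute_commands commands)

-- ===== LEMMAS AND PROOFS =====

-- ===== VERDICT (by name: the statement is the Claim_ definition above) =====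
-- A's fold computes B's filtered-sum horizontal and B's (aim, vertical) fold, component-wise
theorem loops_agree (cs : List (String × Int)) : ∀ (h v a : Int),
    cs.foldl stepA (h, v, a)
      = (cs.foldl (fun acc du => if du.1 == "forward" then acc + du.2 else acc) h,
         (cs.foldl stepB (a, v)).2, (cs.foldl stepB (a, v)).1) := by
  induction cs with
  | nil => intro h v a; rfl
  | cons du cs ih =>
    intro h v a
    obtain ⟨d, u⟩ := du
    simp only [List.foldl_cons]
    by_cases hf : d = "forward"
    · subst hf; simp [stepA, stepB, ih]
    · by_cases hu : d = "up"
      · subst hu; simp [stepA, stepB, ih]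
      · by_cases hd : d = "down"
        · subst hd; simp [stepA, stepB, ih]
        · simp [stepA, stepB, hf, hu, hd, ih]

theorem execute_commands_spec : Claim_equal_execute_commands := by
  intro commands _
  unfold Spec_execute_commands execute_commands execute_commands_alt
  simp [loops_agree]
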